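-- pv_equiv track=rewrite | github.com/nine314211915-cpu/idcardmaker | app.py | summarize_batch
-- ===== SOURCE A (Python) =====
-- def summarize_batch(records):
--     saved = [r for r in records if not r.get("submitted_at")]
--     submitted = [r for r in records if r.get("submitted_at")]
--     return {
--         "saved_count": len(saved),
--         "submitted_count": len(submitted),
--         "total_count": len(records),
--     }
-- ===== SOURCE B (Python) =====
-- def summarize_batch(records):
--     total = len(records)
--     submitted = 0
--     for r in records:
--         if r.get("submitted_at"):
--             submitted += 1
--     return {
--         "saved_count": total - submitted,
--         "submitted_count": submitted,
--         "total_count": total,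
--     }
-- ===== Notes on version B (the rewrite author's own statement) =====
-- stated objective: simpler
-- what changed: Replaces A's two list-comprehension filtering passes (materializing both sublists) with a single counting pass and computes saved_count as total - submitted, building no intermediate lists.
import Mathlib
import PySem

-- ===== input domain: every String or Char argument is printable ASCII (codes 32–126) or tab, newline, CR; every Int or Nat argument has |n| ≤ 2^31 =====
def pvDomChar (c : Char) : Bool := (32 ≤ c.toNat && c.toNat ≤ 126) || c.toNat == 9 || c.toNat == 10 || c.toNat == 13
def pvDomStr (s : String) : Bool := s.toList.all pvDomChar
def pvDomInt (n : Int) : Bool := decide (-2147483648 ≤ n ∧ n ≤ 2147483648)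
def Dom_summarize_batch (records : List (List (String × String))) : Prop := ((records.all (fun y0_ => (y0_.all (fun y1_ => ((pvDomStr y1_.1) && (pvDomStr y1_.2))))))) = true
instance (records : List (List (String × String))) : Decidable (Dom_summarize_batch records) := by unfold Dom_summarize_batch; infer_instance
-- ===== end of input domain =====

-- ===== PORT A =====
-- r.get("submitted_at") truthiness: some nonempty string (first match in the association list)
def pvSubmitted (r : List (String × String)) : Bool :=
  match r.find? (fun kv => kv.1 == "submitted_at") with
  | some kv => kv.2 != ""
  | none => false

def summarize_batch (records : List (List (String × String))) : List (String × Int) :=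
  let saved := records.filter (fun r => ! pvSubmitted r)
  let submitted := records.filter (fun r => pvSubmitted r)
  [("saved_count", (saved.length : Int)),
   ("submitted_count", (submitted.length : Int)),
   ("total_count", (records.length : Int))]

-- ===== PORT B =====
-- B: one counting pass, saved_count = total - submitted; no intermediate lists ("simpler" objective)
def summarize_batch_alt (records : List (List (String × String))) : List (String × Int) :=
  let total : Int := records.length
  let submitted : Int := records.foldl (fun n r => if pvSubmitted r then n + 1 else n) 0
  [("saved_count", total - submitted),
   ("submitted_count", submitted),
   ("total_count", total)]

-- ===== PRECONDITION & SPEC =====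
def Spec_summarize_batch (records : List (List (String × String))) (out : List (String × Int)) : Prop := out = summarize_batch_alt records
instance (records : List (List (String × String))) (out : List (String × Int)) : Decidable (Spec_summarize_batch records out) := by unfold Spec_summarize_batch; infer_instance

-- ===== CLAIM (what is proved, stated in full; the proofs are below) =====
def Claim_equal_summarize_batch : Prop := ∀ (records : List (List (String × String))), Dom_summarize_batch records → Spec_summarize_batch records (summarize_batch records)

-- ===== LEMMAS AND PROOFS =====

-- ===== VERDICT (by name: the statement is the Claim_ definition above) =====
theorem pv_foldl_count (p : List (String × String) → Bool) :
    ∀ (l : List (List (String × String))) (n : Int),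
      l.foldl (fun n r => if p r then n + 1 else n) n = n + ((l.filter p).length : Int) := by
  intro l
  induction l with
  | nil => intro n; simp
  | cons x xs ih =>
    intro n
    by_cases h : p x <;> simp [List.foldl, h, ih] <;> push_cast <;> ring

theorem pv_filter_not_len (p : List (String × String) → Bool)
    (l : List (List (String × String))) :
    (l.filter (fun r => ! p r)).length + (l.filter (fun r => p r)).length = l.length := by
  induction l with
  | nil => rfl
  | cons x xs ih => by_cases h : p x <;> simp [h] <;> omega

theorem summarize_batch_spec : Claim_equal_summarize_batch := by
  intro records _
  unfold Spec_summarize_batch summarize_batch summarize_batch_alt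
  have h1 := pv_foldl_count pvSubmitted records 0
  have h2 := pv_filter_not_len pvSubmitted records
  simp only [h1]
  simp only [List.cons.injEq, Prod.mk.injEq, and_true, true_and]
  simp only [show (fun r => pvSubmitted r) = pvSubmitted from rfl] at h2 ⊢
  constructor
  · omega
  · simp
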